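-- pv_equiv track=rewrite | github.com/TheAbram322/tp4 | minChange.py | min_change
-- ===== SOURCE A (Python) =====
-- def is_it_palindrome(input_str):
--     if input_str == input_str[::-1]:
--         return True
--     else:
--         return False
--
-- def min_change(input_str):
--     max_len = -1
--     if is_it_palindrome(input_str):
--         return 0
--     else:
--         for n in range(input_str.__len__()):
--             substr = [input_str[i: i + n] for i in range(input_str.__len__() - n + 1)]
--             for item in substr:
--                 if is_it_palindrome(item) and max_len < item.__len__():
--                     if item == input_str[0: item.__len__()] or item == \
--                             input_str[input_str.__len__() - item.__len__(): input_str.__len__()]: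
--                         max_len = item.__len__()
--
--     return input_str.__len__() - max_len
-- ===== SOURCE B (Python) =====
-- def min_change(input_str):
--     s = input_str
--     n = len(s)
--     if s == s[::-1]:
--         return 0
--     best = 0
--     for k in range(1, n):
--         if s[:k] == s[:k][::-1] or s[n - k:] == s[n - k:][::-1]:
--             best = k
--     return n - best
-- ===== Notes on version B (the rewrite author's own statement) =====
-- stated objective: faster
-- what changed: B drops A's enumeration of all substrings of every length and scans only the n prefixes and n suffixes for palindromicity, tracking the longest, which removes an entire inner loop (O(n^3) -> O(n^2)).
import Mathlib
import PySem

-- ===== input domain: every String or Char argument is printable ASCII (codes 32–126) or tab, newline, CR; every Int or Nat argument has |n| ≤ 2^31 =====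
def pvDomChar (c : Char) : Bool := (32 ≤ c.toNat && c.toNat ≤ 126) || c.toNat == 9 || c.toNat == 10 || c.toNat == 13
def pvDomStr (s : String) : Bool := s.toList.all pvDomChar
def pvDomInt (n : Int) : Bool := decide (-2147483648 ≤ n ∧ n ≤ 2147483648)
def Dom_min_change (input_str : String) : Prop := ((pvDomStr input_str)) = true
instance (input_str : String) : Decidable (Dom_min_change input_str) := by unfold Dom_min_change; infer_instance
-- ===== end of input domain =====

-- B scans only the n prefixes and n suffixes for palindromicity instead of enumerating all substrings of all lengths.
-- Strings are handled as List Char (String.toList); s[::-1] is ported via PySem (exact by PySem.List.slice?_none_none_neg_one).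

-- ===== PORT A =====
-- helper is_it_palindrome, as in A


def is_it_palindrome (input_str : List Char) : Bool :=
  if input_str = (PySem.List.slice? input_str none none (-1)).getD [] then true else false

-- the body of A's outer 'for n in range(len(input_str))' loop: builds substr, then runs the inner 'for item in substr' loop

def pvStepA (s : List Char) (max_len : Int) (n : Int) : Int :=
  let substr := (PySem.List.pyRange 0 (PySem.List.len s - n + 1) 1).map
    (fun i => PySem.List.slice s (some i) (some (i + n)))
  substr.foldl (fun max_len item =>
    if is_it_palindrome item = true ∧ max_len < PySem.List.len item ∧
       (item = PySem.List.slice s (some 0) (some (PySem.List.len item)) ∨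
        item = PySem.List.slice s (some (PySem.List.len s - PySem.List.len item)) (some (PySem.List.len s)))
    then PySem.List.len item else max_len) max_len

def min_change (input_str : String) : Int :=
  let s := input_str.toList
  if is_it_palindrome s = true then 0
  else
    PySem.List.len s -
      (PySem.List.pyRange 0 (PySem.List.len s) 1).foldl (pvStepA s) (-1)

-- ===== PORT B =====
-- the body of B's 'for k in range(1, n)' loop; x == x[::-1] is ported as x = x.reverse (PySem.List.slice?_none_none_neg_one)

def pvStepB (s : List Char) (best k : Int) : Int :=
  let pre := PySem.List.slice s none (some k)
  let suf := PySem.List.slice s (some (PySem.List.len s - k)) none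
  if pre = pre.reverse ∨ suf = suf.reverse then k else best

def min_change_alt (input_str : String) : Int :=
  let s := input_str.toList
  let n := PySem.List.len s
  if s = s.reverse then 0
  else
    n - (PySem.List.pyRange 1 n 1).foldl (pvStepB s) 0

-- ===== PRECONDITION & SPEC =====
def Spec_min_change (input_str : String) (out : Int) : Prop := out = min_change_alt input_str
instance (input_str : String) (out : Int) : Decidable (Spec_min_change input_str out) := by unfold Spec_min_change; infer_instance

-- ===== CLAIM (what is proved, stated in full; the proofs are below) =====
def Claim_equal_min_change : Prop := ∀ (input_str : String), Dom_min_change input_str → Spec_min_change input_str (min_change input_str)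

-- ===== LEMMAS AND PROOFS =====

-- s[0:k] normalizes to take

theorem pvSL1 (s : List Char) (n : Nat) :
    PySem.List.slice s (some 0) (some (n : Int)) = s.take n := by
  rw [PySem.List.slice_zero_start, PySem.List.slice_to_natCast]

-- s[len-k:len] normalizes to drop

theorem pvSL2 (s : List Char) (n : Nat) (hn : n ≤ s.length) :
    PySem.List.slice s (some ((s.length : Int) - (n : Int))) (some (s.length : Int)) = s.drop (s.length - n) := by
  have h1 : ((s.length : Int) - (n : Int)) = ((s.length - n : Nat) : Int) := by omega
  rw [h1, PySem.List.slice_natCast]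
  have h2 : s.length - (s.length - n) = n := by omega
  rw [h2]
  exact List.take_of_length_le (by simp; omega)

-- A's palindrome test is list-reversal equality

theorem pv_pal_iff (x : List Char) : is_it_palindrome x = true ↔ x = x.reverse := by
  simp [is_it_palindrome, PySem.List.slice?_none_none_neg_one]

-- once max_len has reached n, the inner loop over length-n substrings never changes it

theorem pvS1 (s : List Char) (n : Nat) (items : List (List Char))
    (h : ∀ x ∈ items, x.length = n) (m : Int) (hm : (n : Int) ≤ m) :
    items.foldl (fun max_len item =>
      if is_it_palindrome item = true ∧ max_len < PySem.List.len item ∧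
         (item = PySem.List.slice s (some 0) (some (PySem.List.len item)) ∨
          item = PySem.List.slice s (some (PySem.List.len s - PySem.List.len item)) (some (PySem.List.len s)))
      then PySem.List.len item else max_len) m = m := by
  induction items with
  | nil => rfl
  | cons x xs ih =>
    have hx : x.length = n := h x (List.mem_cons_self ..)
    have hlen : PySem.List.len x = (n : Int) := by simp [hx]
    simp only [List.foldl_cons, hlen]
    rw [if_neg (by rintro ⟨-, h2, -⟩; omega)]
    exact ih (fun y hy => h y (List.mem_cons_of_mem _ hy))

-- one step of A's inner loop, on a length-n item, with max_len < n

theorem pv_step1 (s x : List Char) (n : Nat) (hn : n ≤ s.length) (hx : x.length = n)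
    (m : Int) (hm : m < (n : Int)) :
    (if is_it_palindrome x = true ∧ m < PySem.List.len x ∧
         (x = PySem.List.slice s (some 0) (some (PySem.List.len x)) ∨
          x = PySem.List.slice s (some (PySem.List.len s - PySem.List.len x)) (some (PySem.List.len s)))
     then PySem.List.len x else m)
    = if (x = x.reverse ∧ (x = s.take n ∨ x = s.drop (s.length - n))) then (n : Int) else m := by
  have hlen : PySem.List.len x = (n : Int) := by simp [hx]
  simp only [hlen, PySem.List.len_eq, pvSL1, pvSL2 s n hn]
  by_cases hP : x = x.reverse ∧ (x = s.take n ∨ x = s.drop (s.length - n))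
  · rw [if_pos ⟨(pv_pal_iff x).2 hP.1, hm, hP.2⟩, if_pos hP]
  · rw [if_neg (by rintro ⟨h1, -, h3⟩; exact hP ⟨(pv_pal_iff x).1 h1, h3⟩), if_neg hP]

-- A's inner loop sets max_len to n iff some length-n item is a palindromic prefix or suffix of s

theorem pvS2 (s : List Char) (n : Nat) (hn : n ≤ s.length) (items : List (List Char))
    (h : ∀ x ∈ items, x.length = n) (m : Int) (hm : m < (n : Int)) :
    items.foldl (fun max_len item =>
      if is_it_palindrome item = true ∧ max_len < PySem.List.len item ∧
         (item = PySem.List.slice s (some 0) (some (PySem.List.len item)) ∨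
          item = PySem.List.slice s (some (PySem.List.len s - PySem.List.len item)) (some (PySem.List.len s)))
      then PySem.List.len item else max_len) m
    = if (∃ x ∈ items, x = x.reverse ∧ (x = s.take n ∨ x = s.drop (s.length - n))) then (n : Int) else m := by
  induction items generalizing m with
  | nil => simp
  | cons x xs ih =>
    have hx : x.length = n := h x (List.mem_cons_self ..)
    have htail : ∀ y ∈ xs, y.length = n := fun y hy => h y (List.mem_cons_of_mem _ hy)
    rw [List.foldl_cons, pv_step1 s x n hn hx m hm]
    by_cases hP : x = x.reverse ∧ (x = s.take n ∨ x = s.drop (s.length - n))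
    · rw [if_pos hP, pvS1 s n xs htail _ le_rfl, if_pos ⟨x, List.mem_cons_self .., hP⟩]
    · rw [if_neg hP, ih htail m hm]
      simp [hP]

-- hence A's whole iteration for length n just tests the n-prefix and the n-suffix — which is B's step

theorem pvStepA_eq (s : List Char) (n : Nat) (hn : n ≤ s.length) (m : Int) (hm : m < (n : Int)) :
    pvStepA s m (n : Int) = if (s.take n = (s.take n).reverse ∨ s.drop (s.length - n) = (s.drop (s.length - n)).reverse) then (n : Int) else m := by
  have hlen : ∀ x ∈ (PySem.List.pyRange 0 (PySem.List.len s - (n : Int) + 1) 1).map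
      (fun i => PySem.List.slice s (some i) (some (i + (n : Int)))), x.length = n := by
    intro x hxm
    obtain ⟨i, hi, rfl⟩ := List.mem_map.1 hxm
    rw [PySem.List.mem_pyRange_one] at hi
    simp only [PySem.List.len_eq] at hi
    rw [PySem.List.slice_toNat _ hi.1 (by omega)]
    have h1 : (i + (n : Int)).toNat - i.toNat = n := by omega
    rw [h1]
    simp only [List.length_take, List.length_drop]
    omega
  unfold pvStepA
  rw [pvS2 s n hn _ hlen m hm]
  have hiff : (∃ x ∈ (PySem.List.pyRange 0 (PySem.List.len s - (n : Int) + 1) 1).map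
      (fun i => PySem.List.slice s (some i) (some (i + (n : Int)))),
      x = x.reverse ∧ (x = s.take n ∨ x = s.drop (s.length - n))) ↔ (s.take n = (s.take n).reverse ∨ s.drop (s.length - n) = (s.drop (s.length - n)).reverse) := by
    constructor
    · rintro ⟨x, -, hpal, (rfl | rfl)⟩
      · exact Or.inl hpal
      · exact Or.inr hpal
    · intro hg
      rcases hg with hg | hg
      · refine ⟨s.take n, List.mem_map.2 ⟨0, ?_, ?_⟩, hg, Or.inl rfl⟩
        · rw [PySem.List.mem_pyRange_one]; simp; omega
        · rw [zero_add, pvSL1]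
      · refine ⟨s.drop (s.length - n), List.mem_map.2 ⟨((s.length - n : Nat) : Int), ?_, ?_⟩, hg, Or.inr rfl⟩
        · rw [PySem.List.mem_pyRange_one]; simp; omega
        · have h1 : ((s.length - n : Nat) : Int) + (n : Int) = ((s.length : Nat) : Int) := by omega
          rw [h1, PySem.List.slice_natCast]
          have h2 : s.length - (s.length - n) = n := by omega
          rw [h2]
          exact List.take_of_length_le (by simp; omega)
  rw [if_congr hiff rfl rfl]

theorem pvStepB_eq (s : List Char) (n : Nat) (hn : n ≤ s.length) (m : Int) :
    pvStepB s m (n : Int) = if (s.take n = (s.take n).reverse ∨ s.drop (s.length - n) = (s.drop (s.length - n)).reverse) then (n : Int) else m := by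
  unfold pvStepB
  have h1 : PySem.List.len s - (n : Int) = ((s.length - n : Nat) : Int) := by
    simp only [PySem.List.len_eq]; omega
  rw [PySem.List.slice_to_natCast, h1, PySem.List.slice_from_natCast]

-- the two loops agree from any start a ≥ 1 with state m < a

theorem pv_fold_eq (s : List Char) (d a : Nat) (hd : s.length - a = d) (ha : a ≤ s.length)
    (m : Int) (hm : m < (a : Int)) :
    (PySem.List.pyRange (a : Int) ((s.length : Nat) : Int) 1).foldl (pvStepA s) m
  = (PySem.List.pyRange (a : Int) ((s.length : Nat) : Int) 1).foldl (pvStepB s) m := by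
  induction d generalizing a m with
  | zero =>
    rw [PySem.List.pyRange_one_eq_nil (by omega)]
    rfl
  | succ d ih =>
    have hlt : (a : Int) < ((s.length : Nat) : Int) := by omega
    rw [PySem.List.pyRange_one_cons hlt, List.foldl_cons, List.foldl_cons,
      pvStepA_eq s a (by omega) m hm, pvStepB_eq s a (by omega) m]
    have hc : (a : Int) + 1 = ((a + 1 : Nat) : Int) := by omega
    rw [hc]
    exact ih (a + 1) (by omega) (by omega) _ (by split_ifs <;> omega)

-- main equivalence

theorem pv_main (input_str : String) : min_change input_str = min_change_alt input_str := by
  unfold min_change min_change_alt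
  set s := input_str.toList with hs
  by_cases hpal : s = s.reverse
  · rw [if_pos ((pv_pal_iff s).2 hpal), if_pos hpal]
  · rw [if_neg (fun h => hpal ((pv_pal_iff s).1 h)), if_neg hpal]
    have hne : s ≠ [] := by intro h; rw [h] at hpal; exact hpal rfl
    have hL : 0 < s.length := List.length_pos_iff.2 hne
    simp only [PySem.List.len_eq]
    congr 1
    rw [PySem.List.pyRange_one_cons (by exact_mod_cast hL), List.foldl_cons]
    have h0 : pvStepA s (-1) 0 = 0 := by
      have := pvStepA_eq s 0 (by omega) (-1) (by norm_num)
      simpa using this.trans (if_pos (Or.inl (by simp)))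
    rw [h0]
    have hc : (0 : Int) + 1 = ((1 : Nat) : Int) := by norm_num
    rw [hc]
    have := pv_fold_eq s (s.length - 1) 1 rfl (by omega) 0 (by norm_num)
    simpa using this

-- ===== VERDICT (by name: the statement is the Claim_ definition above) =====
theorem min_change_spec : Claim_equal_min_change := by
  intro input_str _
  exact pv_main input_str
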